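-- pv_equiv track=rewrite | github.com/hossein-se/Image-Processing | filters/filters4.py | man_picture_fit_filter
-- ===== SOURCE A (Python) =====
-- def man_picture_fit_filter(image):
--
--
--     filtered_image = []
--
--     image_height = len(image)
--     image_width = len(image[0])
--
--     center_x = int(image_width / 2)
--     center_y = int(image_height / 2)
--
--     x1 = center_x - 0.25
--     x2 = center_x + 0.25
--     y1 = 0
--     y2 = center_y - 10
--     x3 = center_x - 0.25
--     y3 = center_y + 10
--     x4 = center_x + 0.25
--     y4 = image_height
--
--     for row_counter in range(image_height):
--         row = []
--         for pixel_counter in range(image_width):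
--
--             if (pixel_counter >= x1) and (pixel_counter <= x2) and (row_counter >= y1) and (row_counter <= y2):
--                 row.append(0)
--             elif (pixel_counter >= x3) and (pixel_counter <= x4) and (row_counter >= y3) and (row_counter <= y4):
--                 row.append(0)
--             else:
--                 row.append(image[row_counter][pixel_counter])
--
--         filtered_image.append(row)
--
--     return filtered_image
-- ===== SOURCE B (Python) =====
-- def man_picture_fit_filter(image):
--     image_height = len(image)
--     image_width = len(image[0])
--     center_x = image_width // 2
--     center_y = image_height // 2
--     filtered_image = []
--     for row_counter, src in enumerate(image):
--         row = [src[p] for p in range(image_width)]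
--         if image_width > 0 and (row_counter <= center_y - 10 or row_counter >= center_y + 10):
--             row[center_x] = 0
--         filtered_image.append(row)
--     return filtered_image
-- ===== Notes on version B (the rewrite author's own statement) =====
-- stated objective: simpler
-- what changed: B replaces A's per-pixel two-band branch inside the nested loop by a single pass over rows that copies each row with a comprehension and then zeroes the one center column when the row lies in one of the two bands.
import Mathlib
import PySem

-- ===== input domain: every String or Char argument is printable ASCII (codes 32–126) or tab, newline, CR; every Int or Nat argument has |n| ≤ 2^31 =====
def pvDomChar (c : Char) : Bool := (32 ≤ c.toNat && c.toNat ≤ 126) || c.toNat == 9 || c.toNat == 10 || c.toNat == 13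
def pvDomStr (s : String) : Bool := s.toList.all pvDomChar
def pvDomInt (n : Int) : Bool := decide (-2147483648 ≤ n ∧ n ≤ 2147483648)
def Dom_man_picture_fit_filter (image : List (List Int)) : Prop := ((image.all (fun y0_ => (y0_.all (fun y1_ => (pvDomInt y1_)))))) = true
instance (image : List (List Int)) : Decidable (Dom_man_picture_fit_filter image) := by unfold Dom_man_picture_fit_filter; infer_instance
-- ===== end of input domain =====

-- B replaces the nested per-pixel two-band branch by one pass over rows: copy each row with a
-- comprehension and zero the single center column in the two row bands (objective: simpler).

-- ===== PORT A =====
def man_picture_fit_filter (image : List (List Int)) : List (List Int) :=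
  let image_height : Int := image.length
  let image_width : Int := ((PySem.List.pyGet? image 0).getD []).length
  let center_x : Int := image_width / 2   -- int(image_width / 2): image_width ≥ 0, so truncation is this division
  let center_y : Int := image_height / 2
  -- x1 = center_x - 0.25, x2 = center_x + 0.25: for an integer p, p ≥ x1 ∧ p ≤ x2 is exactly
  -- 4*p ≥ 4*center_x - 1 ∧ 4*p ≤ 4*center_x + 1 (exact integer form of the float comparison)
  (PySem.List.pyRange 0 image_height 1).foldl (fun filtered_image row_counter =>
    filtered_image ++ [(PySem.List.pyRange 0 image_width 1).foldl (fun row pixel_counter =>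
      if 4 * pixel_counter ≥ 4 * center_x - 1 ∧ 4 * pixel_counter ≤ 4 * center_x + 1 ∧
         row_counter ≥ 0 ∧ row_counter ≤ center_y - 10 then row ++ [0]
      else if 4 * pixel_counter ≥ 4 * center_x - 1 ∧ 4 * pixel_counter ≤ 4 * center_x + 1 ∧
         row_counter ≥ center_y + 10 ∧ row_counter ≤ image_height then row ++ [0]
      else row ++ [PySem.List.pyGetD ((PySem.List.pyGet? image row_counter).getD []) pixel_counter 0]) []]) []

-- ===== PORT B =====
def man_picture_fit_filter_alt (image : List (List Int)) : List (List Int) :=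
  let image_width : Nat := (image.headD []).length
  let center_x : Nat := image_width / 2
  let center_y : Int := (image.length : Int) / 2
  (PySem.List.enumerate image 0).map (fun rs =>
    let row := (PySem.List.pyRange 0 (image_width : Int) 1).map (fun p => PySem.List.pyGetD rs.2 p 0)
    if 0 < image_width ∧ (rs.1 ≤ center_y - 10 ∨ rs.1 ≥ center_y + 10) then row.set center_x 0
    else row)

-- ===== PRECONDITION & SPEC =====
-- Pre_ excludes exactly the inputs on which A raises: the empty image (len(image[0]) is an
-- IndexError) and images with some row shorter than the first row (image[r][p] raises).
def Pre_man_picture_fit_filter (image : List (List Int)) : Prop :=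
  image ≠ [] ∧ ∀ row ∈ image, (image.headD []).length ≤ row.length
instance (image : List (List Int)) : Decidable (Pre_man_picture_fit_filter image) := by
  unfold Pre_man_picture_fit_filter; infer_instance

def pvWitness_man_picture_fit_filter : List (List Int) := [[1, 2], [3, 4]]

def Spec_man_picture_fit_filter (image : List (List Int)) (out : List (List Int)) : Prop := out = man_picture_fit_filter_alt image
instance (image : List (List Int)) (out : List (List Int)) : Decidable (Spec_man_picture_fit_filter image out) := by unfold Spec_man_picture_fit_filter; infer_instance

-- ===== CLAIM (what is proved, stated in full; the proofs are below) =====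
def Claim_equal_man_picture_fit_filter : Prop := ∀ (image : List (List Int)), Dom_man_picture_fit_filter image → Pre_man_picture_fit_filter image → Spec_man_picture_fit_filter image (man_picture_fit_filter image)

-- ===== LEMMAS AND PROOFS =====

-- mapping over enumerate = mapping over indices
theorem pv_map_enumerate {α β : Type} (d : α) (g : Int × α → β) :
    ∀ (xs : List α) (s : Int),
      (PySem.List.enumerate xs s).map g
        = (List.range xs.length).map (fun k : Nat => g (s + (k : Int), xs.getD k d)) := by
  intro xs
  induction xs with
  | nil => intro s; simp [PySem.List.enumerate]
  | cons x xs ih =>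
      intro s
      rw [PySem.List.enumerate_cons]
      simp only [List.map_cons, List.length_cons, List.range_succ_eq_map, List.map_map]
      refine congrArg₂ _ (by simp) ?_
      rw [ih (s + 1)]
      apply List.map_congr_left
      intro k _
      simp only [Function.comp]
      have h1 : s + 1 + (k : Int) = s + (((k : Nat) + 1 : Nat) : Int) := by push_cast; ring
      rw [h1]
      rfl

-- push the per-pixel append out of A's inner fold
theorem pv_inner_push (c1 c2 : Int → Prop) [DecidablePred c1] [DecidablePred c2]
    (v : Int → Int) (xs : List Int) (init : List Int) :
    xs.foldl (fun row p => if c1 p then row ++ [0] else if c2 p then row ++ [0] else row ++ [v p]) init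
      = init ++ xs.map (fun p => if c1 p then 0 else if c2 p then 0 else v p) := by
  induction xs generalizing init with
  | nil => simp
  | cons x xs ih => simp only [List.foldl_cons, List.map_cons, ih]; split_ifs <;> simp

-- A's row, written with abstract row-band conditions, is B's row
theorem pv_rowA (row : List Int) (w cx : Nat) (b1 b2 : Prop) [Decidable b1] [Decidable b2] :
    (List.range w).map (fun p => if p = cx ∧ b1 then 0 else if p = cx ∧ b2 then 0 else row.getD p 0)
      = (if b1 ∨ b2 then ((List.range w).map (fun p => row.getD p 0)).set cx 0
         else (List.range w).map (fun p => row.getD p 0)) := by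
  by_cases hb : b1 ∨ b2
  · rw [if_pos hb]
    apply List.ext_getElem
    · simp
    · intro p hp1 hp2
      simp only [List.length_map, List.length_range] at hp1
      rw [List.getElem_map, List.getElem_range, List.getElem_set, List.getElem_map,
          List.getElem_range]
      rcases hb with hb | hb
      · by_cases hpc : p = cx
        · rw [if_pos ⟨hpc, hb⟩, if_pos hpc.symm]
        · rw [if_neg (fun hc => hpc hc.1), if_neg (fun hc => hpc hc.1),
              if_neg (fun hc => hpc hc.symm)]
      · by_cases hpc : p = cx
        · rw [if_pos hpc.symm]
          by_cases hb1 : b1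
          · rw [if_pos ⟨hpc, hb1⟩]
          · rw [if_neg (fun hc => hb1 hc.2), if_pos ⟨hpc, hb⟩]
        · rw [if_neg (fun hc => hpc hc.1), if_neg (fun hc => hpc hc.1),
              if_neg (fun hc => hpc hc.symm)]
  · rw [if_neg hb]
    rw [not_or] at hb
    apply List.map_congr_left
    intro p hp
    rw [if_neg (fun hc => hb.1 hc.2), if_neg (fun hc => hb.2 hc.2)]

theorem man_picture_fit_filter_spec : Claim_equal_man_picture_fit_filter := by
  intro image _ hpre
  obtain ⟨hne, hlen⟩ := hpre
  unfold Spec_man_picture_fit_filter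
  simp only [man_picture_fit_filter, man_picture_fit_filter_alt]
  rw [pv_map_enumerate ([] : List Int)]
  have hget0 : (PySem.List.pyGet? image 0).getD [] = image.headD [] := by
    cases image with
    | nil => exact absurd rfl hne
    | cons a l => simp
  rw [hget0]
  set h : Nat := image.length with hh
  set w : Nat := (image.headD []).length with hw
  set cy : Int := (h : Int) / 2 with hcy
  set cxI : Int := (w : Int) / 2 with hcxI
  rw [PySem.List.foldl_append_singleton_eq_map]
  simp only [PySem.List.pyRange_one, Int.sub_zero, Int.toNat_natCast, List.map_map,
    List.nil_append]
  apply List.map_congr_left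
  intro r hr
  rw [List.mem_range] at hr
  simp only [Function.comp, Int.zero_add]
  rw [pv_inner_push
      (fun p => 4 * p ≥ 4 * cxI - 1 ∧ 4 * p ≤ 4 * cxI + 1 ∧ (r : Int) ≥ 0 ∧ (r : Int) ≤ cy - 10)
      (fun p => 4 * p ≥ 4 * cxI - 1 ∧ 4 * p ≤ 4 * cxI + 1 ∧ (r : Int) ≥ cy + 10 ∧ (r : Int) ≤ (h : Int))
      (fun p => PySem.List.pyGetD ((PySem.List.pyGet? image (r : Int)).getD []) p 0)]
  have hrow : (PySem.List.pyGet? image (r : Int)).getD [] = image.getD r [] := by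
    rw [PySem.List.pyGet?_natCast, List.getElem?_eq_getElem (by omega),
        List.getD_eq_getElem _ _ (by omega)]
    rfl
  rw [hrow]
  set row : List Int := image.getD r [] with hrowdef
  simp only [List.map_map, List.nil_append]
  have hnorm : ∀ xs : List Int, ((fun p => PySem.List.pyGetD xs p 0) ∘ fun k : Nat => (k : Int))
      = fun p : Nat => xs.getD p 0 := by
    intro xs; funext p; simp [PySem.List.pyGetD_natCast]
  by_cases hw0 : 0 < w
  · have hc1 : ∀ p : Nat,
        (4 * (p : Int) ≥ 4 * cxI - 1 ∧ 4 * (p : Int) ≤ 4 * cxI + 1 ∧ (r : Int) ≥ 0 ∧ (r : Int) ≤ cy - 10)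
          ↔ (p = w / 2 ∧ (r : Int) ≤ cy - 10) := by intro p; omega
    have hc2 : ∀ p : Nat,
        (4 * (p : Int) ≥ 4 * cxI - 1 ∧ 4 * (p : Int) ≤ 4 * cxI + 1 ∧ (r : Int) ≥ cy + 10 ∧ (r : Int) ≤ (h : Int))
          ↔ (p = w / 2 ∧ (r : Int) ≥ cy + 10) := by intro p; omega
    have hstep :
        (List.range w).map ((fun p => if 4 * p ≥ 4 * cxI - 1 ∧ 4 * p ≤ 4 * cxI + 1 ∧ (r : Int) ≥ 0 ∧ (r : Int) ≤ cy - 10 then 0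
            else if 4 * p ≥ 4 * cxI - 1 ∧ 4 * p ≤ 4 * cxI + 1 ∧ (r : Int) ≥ cy + 10 ∧ (r : Int) ≤ (h : Int) then 0
            else PySem.List.pyGetD row p 0) ∘ (fun k : Nat => (k : Int)))
          = (List.range w).map (fun p => if p = w / 2 ∧ (r : Int) ≤ cy - 10 then 0
              else if p = w / 2 ∧ (r : Int) ≥ cy + 10 then 0 else row.getD p 0) := by
      apply List.map_congr_left
      intro p hp
      simp only [Function.comp, hc1 p, hc2 p, PySem.List.pyGetD_natCast]
    rw [hstep, pv_rowA row w (w / 2), hnorm row]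
    have hB : (0 < w ∧ ((r : Int) ≤ cy - 10 ∨ (r : Int) ≥ cy + 10))
        ↔ (((r : Int) ≤ cy - 10) ∨ ((r : Int) ≥ cy + 10)) := by
      constructor
      · exact fun hx => hx.2
      · exact fun hx => ⟨hw0, hx⟩
    simp only [hB]
  · have hw0' : w = 0 := by omega
    simp [hw0']

-- ===== VERDICT (by name: the statement is the Claim_ definition above) =====
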